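-- pv_equiv track=rewrite | github.com/wireshark/wireshark | tools/make-iana-constants.py | make_define
-- ===== SOURCE A (Python) =====
-- def make_define(text):
--     name = text
--     name = name.strip()
--     name = name.upper()
--     name = name.replace('-', ' ')
--     name = name.replace('/', ' ')
--     name = name.replace('.', '')
--     name = ''.join(c if c.isalnum() else ' ' for c in name)
--     name = '_'.join(name.split())
--     return f"IP_PROTO_{name}"
-- ===== SOURCE B (Python) =====
-- def make_define(text):
--     words = []
--     buf = []
--     for c in text.upper():
--         if c == '.':
--             continue
--         if c.isalnum():
--             buf.append(c)
--         elif buf: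
--             words.append(''.join(buf))
--             buf = []
--     if buf:
--         words.append(''.join(buf))
--     return "IP_PROTO_" + "_".join(words)
-- ===== Notes on version B (the rewrite author's own statement) =====
-- stated objective: alternative
-- what changed: Replaces A's chain of six whole-string passes (strip, upper, two replaces, delete dots, char-map, split, join) by a single stateful pass over the uppercased text that collects alphanumeric runs into words, skipping dots without creating a word boundary and flushing the run on any other character.
import Mathlib
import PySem

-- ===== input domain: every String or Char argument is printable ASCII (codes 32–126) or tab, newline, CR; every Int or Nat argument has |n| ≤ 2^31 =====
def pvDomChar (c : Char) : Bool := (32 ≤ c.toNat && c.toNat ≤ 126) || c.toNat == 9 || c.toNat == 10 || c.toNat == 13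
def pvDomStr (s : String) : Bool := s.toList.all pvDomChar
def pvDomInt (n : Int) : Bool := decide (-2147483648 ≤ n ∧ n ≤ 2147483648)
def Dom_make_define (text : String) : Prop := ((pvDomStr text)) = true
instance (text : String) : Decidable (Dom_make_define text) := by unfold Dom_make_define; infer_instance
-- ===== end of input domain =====

-- B replaces A's chain of whole-string transforms by one stateful pass that collects alphanumeric
-- runs as words (skipping dots, flushing on any other character); objective: alternative decomposition.

-- ===== PORT A =====
def make_define (text : String) : String :=
  let name := text.toList
  let name := PySem.Chars.strip name
  let name := PySem.Chars.upper name
  let name := PySem.Chars.replace name ['-'] [' ']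
  let name := PySem.Chars.replace name ['/'] [' ']
  let name := PySem.Chars.replace name ['.'] []
  let name := PySem.Chars.join [] (name.map (fun c => if PySem.Chars.isalnum c then [c] else [' ']))
  let name := PySem.Chars.join ['_'] (PySem.Chars.split₀ name)
  String.mk ("IP_PROTO_".toList ++ name)

-- ===== PORT B =====
-- one step of B's loop body: skip '.', extend the buffer on alnum, otherwise flush a non-empty buffer
def pvStep (st : List (List Char) × List Char) (c : Char) : List (List Char) × List Char :=
  if c = '.' then st
  else if PySem.Chars.isalnum c then (st.1, st.2 ++ [c])
  else if st.2 = [] then st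
  else (st.1 ++ [st.2], [])

def make_define_alt (text : String) : String :=
  let st := (PySem.Chars.upper text.toList).foldl pvStep ([], [])
  let words := if st.2 = [] then st.1 else st.1 ++ [st.2]
  String.mk ("IP_PROTO_".toList ++ PySem.Chars.join ['_'] words)

-- ===== PRECONDITION & SPEC =====
def Spec_make_define (text : String) (out : String) : Prop := out = make_define_alt text
instance (text : String) (out : String) : Decidable (Spec_make_define text out) := by unfold Spec_make_define; infer_instance

-- ===== CLAIM (what is proved, stated in full; the proofs are below) =====
def Claim_equal_make_define : Prop := ∀ (text : String), Dom_make_define text → Spec_make_define text (make_define text)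

-- ===== LEMMAS AND PROOFS =====

-- the character map A's generator expression performs: alnum chars stay, everything else becomes ' '
def pvSig (c : Char) : Char := if PySem.Chars.isalnum c then c else ' '

-- B's step restricted to non-'.' characters
def pvStepF (st : List (List Char) × List Char) (c : Char) : List (List Char) × List Char :=
  if PySem.Chars.isalnum c then (st.1, st.2 ++ [c])
  else if st.2 = [] then st
  else (st.1 ++ [st.2], [])

-- flush the buffer after the loop
def pvFin (st : List (List Char) × List Char) : List (List Char) :=
  if st.2 = [] then st.1 else st.1 ++ [st.2]

-- character-class facts
theorem pv_alnum_not_space (c : Char) (h : PySem.Chars.isalnum c = true) :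
    PySem.Chars.isspace c = false := by
  simp only [PySem.Chars.isalnum, PySem.Chars.isalpha, PySem.Chars.isdigit, PySem.Chars.isupper,
    PySem.Chars.islower, PySem.Chars.isspace, Char.le_def, UInt32.le_iff_toNat_le,
    Char.toNat_val, Char.reduceToNat, Bool.or_eq_true, Bool.and_eq_true, decide_eq_true_eq,
    Bool.or_eq_false_iff, Bool.and_eq_false_iff, decide_eq_false_iff_not, not_le] at *
  omega

theorem pv_space_not_alnum (c : Char) (h : PySem.Chars.isspace c = true) :
    PySem.Chars.isalnum c = false := by
  cases ha : PySem.Chars.isalnum c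
  · rfl
  · rw [pv_alnum_not_space c ha] at h; exact absurd h (by simp)

theorem pv_space_ne_dot (c : Char) (h : PySem.Chars.isspace c = true) : c ≠ '.' := by
  rintro rfl; simp [PySem.Chars.isspace] at h

theorem pv_space_upper (c : Char) (h : PySem.Chars.isspace c = true) :
    PySem.Chars.upperChar c = c := by
  have hl : PySem.Chars.islower c = false := by
    simp only [PySem.Chars.islower, PySem.Chars.isspace, Char.le_def, UInt32.le_iff_toNat_le,
      Char.toNat_val, Char.reduceToNat, Bool.or_eq_true, Bool.and_eq_true, decide_eq_true_eq,
      Bool.and_eq_false_iff, decide_eq_false_iff_not, not_le] at *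
    omega
  simp [PySem.Chars.upperChar, hl]

-- single-character replace is a map
theorem pv_rep_go_single (a b : Char) :
    ∀ (fuel : Nat) (l acc : List Char), l.length ≤ fuel →
      PySem.Chars.replace.go [a] [b] fuel l acc
        = acc.reverse ++ l.map (fun c => if c = a then b else c) := by
  intro fuel
  induction fuel with
  | zero =>
    intro l acc h
    have : l = [] := List.eq_nil_of_length_eq_zero (Nat.le_zero.mp h)
    subst this; rw [PySem.Chars.replace.go]; simp
  | succ n ih =>
    intro l acc h
    cases l with
    | nil => rw [PySem.Chars.replace.go]; simp; omega
    | cons c t =>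
      rw [PySem.Chars.replace.go]
      by_cases hc : c = a
      · subst hc
        simp only [List.isPrefixOf, BEq.rfl, Bool.true_and, if_true]
        rw [show List.drop [c].length (c :: t) = t from rfl,
          show [b].reverse ++ acc = b :: acc from rfl,
          ih t (b :: acc) (by simpa using Nat.le_of_succ_le_succ h)]
        simp
      · have : List.isPrefixOf [a] (c :: t) = false := by
          simp [List.isPrefixOf]; exact fun h' => absurd h'.symm hc
        simp only [this, Bool.false_eq_true, if_false]
        rw [ih t (c :: acc) (by simpa using Nat.le_of_succ_le_succ h)]
        simp [hc]

theorem pv_rep_single (cs : List Char) (a b : Char) :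
    PySem.Chars.replace cs [a] [b] = cs.map (fun c => if c = a then b else c) := by
  rw [PySem.Chars.replace]
  simp only [List.isEmpty_cons, Bool.false_eq_true, if_false]
  simpa using pv_rep_go_single a b cs.length cs [] (Nat.le_refl _)

-- character-deleting replace is a filter
theorem pv_rep_go_del (a : Char) :
    ∀ (fuel : Nat) (l acc : List Char), l.length ≤ fuel →
      PySem.Chars.replace.go [a] [] fuel l acc
        = acc.reverse ++ l.filter (fun c => !(c == a)) := by
  intro fuel
  induction fuel with
  | zero =>
    intro l acc h
    have : l = [] := List.eq_nil_of_length_eq_zero (Nat.le_zero.mp h)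
    subst this; rw [PySem.Chars.replace.go]; simp
  | succ n ih =>
    intro l acc h
    cases l with
    | nil => rw [PySem.Chars.replace.go]; simp; omega
    | cons c t =>
      rw [PySem.Chars.replace.go]
      by_cases hc : c = a
      · subst hc
        simp only [List.isPrefixOf, BEq.rfl, Bool.true_and, if_true]
        rw [show List.drop [c].length (c :: t) = t from rfl,
          show ([] : List Char).reverse ++ acc = acc from rfl,
          ih t acc (by simpa using Nat.le_of_succ_le_succ h)]
        simp
      · have : List.isPrefixOf [a] (c :: t) = false := by
          simp [List.isPrefixOf]; exact fun h' => absurd h'.symm hc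
        simp only [this, Bool.false_eq_true, if_false]
        rw [ih t (c :: acc) (by simpa using Nat.le_of_succ_le_succ h)]
        simp [hc]

theorem pv_rep_del (cs : List Char) (a : Char) :
    PySem.Chars.replace cs [a] [] = cs.filter (fun c => !(c == a)) := by
  rw [PySem.Chars.replace]
  simp only [List.isEmpty_cons, Bool.false_eq_true, if_false]
  simpa using pv_rep_go_del a cs.length cs [] (Nat.le_refl _)

-- ''.join over singleton pieces is a map
theorem pv_join_nil_map (f : Char → Char) (cs : List Char) :
    PySem.Chars.join [] (cs.map (fun c => [f c])) = cs.map f := by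
  induction cs with
  | nil => rfl
  | cons c t ih =>
    simp only [List.map_cons]
    simp only [PySem.Chars.join, List.intercalate] at *
    cases t with
    | nil => simp
    | cons d u => simpa [List.intersperse] using ih

-- split₀.go over the σ-image of a character list is B's word-collecting fold
theorem pv_go_fold (ds : List Char) :
    ∀ (buf : List Char) (words : List (List Char)),
      PySem.Chars.split₀.go (ds.map pvSig) buf.reverse words.reverse
        = pvFin (ds.foldl pvStepF (words, buf)) := by
  induction ds with
  | nil =>
    intro buf words
    rw [PySem.Chars.split₀.go.eq_def]
    cases buf with
    | nil => simp [pvFin]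
    | cons b t => simp [pvFin, List.isEmpty_iff]
  | cons c ds ih =>
    intro buf words
    simp only [List.map_cons, List.foldl_cons]
    rw [PySem.Chars.split₀.go]
    by_cases h : PySem.Chars.isalnum c = true
    · have hσ : pvSig c = c := by simp [pvSig, h]
      have hsp : PySem.Chars.isspace c = false := pv_alnum_not_space c h
      rw [hσ]
      simp only [hsp, Bool.false_eq_true, if_false]
      have : c :: buf.reverse = (buf ++ [c]).reverse := by simp
      rw [this, ih (buf ++ [c]) words]
      simp [pvStepF, h]
    · have hσ : pvSig c = ' ' := by simp [pvSig, h]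
      rw [hσ]
      have hsp : PySem.Chars.isspace ' ' = true := by decide
      simp only [hsp, if_true]
      by_cases hb : buf = []
      · subst hb
        simp only [List.reverse_nil, List.isEmpty_nil, if_true]
        have := ih [] words
        simp only [List.reverse_nil] at this
        rw [this]
        simp [pvStepF, Bool.of_not_eq_true h]
      · have hne : buf.reverse.isEmpty = false := by
          simp [hb]
        simp only [hne, Bool.false_eq_true, if_false, List.reverse_reverse]
        have : buf :: words.reverse = (words ++ [buf]).reverse := by simp
        rw [this]
        have := ih [] (words ++ [buf])
        simp only [List.reverse_nil] at this
        rw [this]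
        simp [pvStepF, Bool.of_not_eq_true h, hb]

-- B's fold with the '.'-skipping step is the filtered fold
theorem pv_fold_filter (ds : List Char) :
    ∀ st, ds.foldl pvStep st = (ds.filter (fun c => !(c == '.'))).foldl pvStepF st := by
  induction ds with
  | nil => intro st; rfl
  | cons c t ih =>
    intro st
    by_cases hc : c = '.'
    · subst hc; simp [pvStep, ih]
    · simp only [List.foldl_cons, List.filter_cons]
      have : (!(c == '.')) = true := by simpa using hc
      rw [this]
      simp only [if_true, List.foldl_cons]
      rw [ih]
      congr 1
      simp [pvStep, pvStepF, hc]

-- leading whitespace leaves the initial empty state unchanged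
theorem pv_sp_pre (ws : List Char) :
    ∀ st : List (List Char) × List Char, (∀ c ∈ ws, PySem.Chars.isspace c = true) → st.2 = [] →
      (ws.map PySem.Chars.upperChar).foldl pvStep st = st := by
  induction ws with
  | nil => intro st _ _; rfl
  | cons c t ih =>
    intro st hws hst
    have hc := hws c (List.mem_cons_self ..)
    simp only [List.map_cons, List.foldl_cons, pv_space_upper c hc]
    have hstep : pvStep st c = st := by
      simp [pvStep, pv_space_ne_dot c hc, pv_space_not_alnum c hc, hst]
    rw [hstep]
    exact ih st (fun d hd => hws d (List.mem_cons_of_mem _ hd)) hst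

-- trailing whitespace does not change the flushed word list
theorem pv_sp_suf (ws : List Char) :
    ∀ st : List (List Char) × List Char, (∀ c ∈ ws, PySem.Chars.isspace c = true) →
      pvFin ((ws.map PySem.Chars.upperChar).foldl pvStep st) = pvFin st := by
  induction ws with
  | nil => intro st _; rfl
  | cons c t ih =>
    intro st hws
    have hc := hws c (List.mem_cons_self ..)
    simp only [List.map_cons, List.foldl_cons, pv_space_upper c hc]
    rw [ih (pvStep st c) (fun d hd => hws d (List.mem_cons_of_mem _ hd))]
    simp only [pvStep, pv_space_ne_dot c hc, pv_space_not_alnum c hc, Bool.false_eq_true,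
      if_false]
    by_cases hst : st.2 = []
    · simp [hst]
    · simp [hst, pvFin]

-- ===== VERDICT (by name: the statement is the Claim_ definition above) =====
theorem make_define_spec : Claim_equal_make_define := by
  intro text _
  unfold Spec_make_define make_define make_define_alt
  dsimp only
  set cs := text.toList with hcs
  -- decompose cs into whitespace ++ strip cs ++ whitespace
  set ws1 := cs.takeWhile PySem.Chars.isspace with hws1
  set t := cs.dropWhile PySem.Chars.isspace with ht
  set mid := (t.reverse.dropWhile PySem.Chars.isspace).reverse with hmid
  set ws2 := (t.reverse.takeWhile PySem.Chars.isspace).reverse with hws2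
  have hsplit : cs = ws1 ++ (mid ++ ws2) := by
    have h1 : cs = ws1 ++ t := (List.takeWhile_append_dropWhile).symm
    have h2 : t = mid ++ ws2 := by
      rw [hmid, hws2, ← List.reverse_append, List.takeWhile_append_dropWhile,
        List.reverse_reverse]
    rw [h1, h2]
  have hstrip : PySem.Chars.strip cs = mid := by
    simp [PySem.Chars.strip, PySem.Chars.lstrip, PySem.Chars.rstrip, ← ht, hmid]
  have hws1sp : ∀ c ∈ ws1, PySem.Chars.isspace c = true := fun c hc =>
    List.mem_takeWhile_imp hc
  have hws2sp : ∀ c ∈ ws2, PySem.Chars.isspace c = true := fun c hc =>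
    List.mem_takeWhile_imp (List.mem_reverse.mp hc)
  -- A side: collapse the pipeline to split₀ (map pvSig (filter (≠ '.') (upper mid)))
  rw [hstrip]
  rw [pv_rep_single, pv_rep_single, pv_rep_del]
  have hifσ : (fun c => if PySem.Chars.isalnum c then [c] else [' ']) = fun c => [pvSig c] := by
    funext c; by_cases h : PySem.Chars.isalnum c = true <;> simp [pvSig, h]
  rw [hifσ, pv_join_nil_map]
  -- push the filter through the two maps and fuse the maps into pvSig
  have hfilter2 : ∀ l : List Char,
      (l.map fun c => if c = '/' then ' ' else c).filter (fun c => !(c == '.'))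
        = (l.filter (fun c => !(c == '.'))).map fun c => if c = '/' then ' ' else c := by
    intro l
    rw [List.filter_map]
    exact congrArg _ (List.filter_congr fun c _ => by
      by_cases h : c = '/' <;> simp [Function.comp, h])
  have hfilter1 : ∀ l : List Char,
      (l.map fun c => if c = '-' then ' ' else c).filter (fun c => !(c == '.'))
        = (l.filter (fun c => !(c == '.'))).map fun c => if c = '-' then ' ' else c := by
    intro l
    rw [List.filter_map]
    exact congrArg _ (List.filter_congr fun c _ => by
      by_cases h : c = '-' <;> simp [Function.comp, h])
  have hfuse : ∀ l : List Char,
      ((l.map fun c => if c = '-' then ' ' else c).map fun c => if c = '/' then ' ' else c).map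
          pvSig = l.map pvSig := by
    intro l
    simp only [List.map_map]
    congr 1
    funext c
    by_cases h1 : c = '-'
    · subst h1; simp [pvSig]; decide
    · by_cases h2 : c = '/'
      · subst h2; simp [pvSig]; decide
      · simp [Function.comp, h1, h2]
  rw [show ∀ (l : List Char),
      (((l.map fun c => if c = '-' then ' ' else c).map fun c => if c = '/' then ' ' else c).filter
          (fun c => !(c == '.'))).map pvSig
        = (l.filter (fun c => !(c == '.'))).map pvSig from
    fun l => by rw [hfilter2, hfilter1, hfuse]]
  -- B side: strip the surrounding whitespace off the fold, filter the dots, then pv_go_fold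
  have hupper : PySem.Chars.upper cs
      = ws1.map PySem.Chars.upperChar ++ ((PySem.Chars.upper mid) ++ ws2.map PySem.Chars.upperChar) := by
    rw [PySem.Chars.upper]
    conv_lhs => rw [hsplit]
    simp [PySem.Chars.upper]
  rw [hupper, List.foldl_append, pv_sp_pre ws1 ([], []) hws1sp rfl, List.foldl_append]
  have hBfin :
      (if ((ws2.map PySem.Chars.upperChar).foldl pvStep
            ((PySem.Chars.upper mid).foldl pvStep ([], []))).2 = []
        then ((ws2.map PySem.Chars.upperChar).foldl pvStep
            ((PySem.Chars.upper mid).foldl pvStep ([], []))).1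
        else ((ws2.map PySem.Chars.upperChar).foldl pvStep
            ((PySem.Chars.upper mid).foldl pvStep ([], []))).1
          ++ [((ws2.map PySem.Chars.upperChar).foldl pvStep
            ((PySem.Chars.upper mid).foldl pvStep ([], []))).2])
      = pvFin ((PySem.Chars.upper mid).foldl pvStep ([], [])) := by
    rw [show (if ((ws2.map PySem.Chars.upperChar).foldl pvStep
          ((PySem.Chars.upper mid).foldl pvStep ([], []))).2 = []
        then ((ws2.map PySem.Chars.upperChar).foldl pvStep
          ((PySem.Chars.upper mid).foldl pvStep ([], []))).1
        else _)
      = pvFin ((ws2.map PySem.Chars.upperChar).foldl pvStep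
          ((PySem.Chars.upper mid).foldl pvStep ([], []))) from rfl]
    exact pv_sp_suf ws2 _ hws2sp
  rw [hBfin, pv_fold_filter]
  have hgo := pv_go_fold ((PySem.Chars.upper mid).filter (fun c => !(c == '.'))) [] []
  simp only [List.reverse_nil] at hgo
  rw [PySem.Chars.split₀, hgo]
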